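-- pv_equiv track=rewrite | github.com/TaewooRiver/AirForce1 | OSAM_MOCK/1.py | solution
-- ===== SOURCE A (Python) =====
-- def solution(s):
--
--     res = []
--     tmp = ''
--     if s[0] == s[1]:
--         res = ['']
--     else:
--
--         tmp += str(s[0])
--     for i in range(1, len(s) - 1):
--         if s[i] == s[i - 1] or s[i] == s[i + 1]:
--             if tmp != '':
--                 res.append(tmp)
--             tmp = ''
--         else:
--             tmp += str(s[i])
--     if s[-1] == s[-2]:
--         if tmp != '':
--             res.append(tmp)
--         res.append("")
--     else:
--         tmp += str(s[-1])
--         res.append(tmp)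
--
--     return res
-- ===== SOURCE B (Python) =====
-- def solution(s):
--     lead = s[0] == s[1]
--     trail = s[-1] == s[-2]
--     out = []
--     acc = ''
--     cur, cnt = s[0], 1
--     for c in s[1:]:
--         if c == cur:
--             cnt += 1
--         elif cnt == 1:
--             acc += cur
--             cur, cnt = c, 1
--         else:
--             if acc:
--                 out.append(acc)
--             acc = ''
--             cur, cnt = c, 1
--     if cnt == 1:
--         acc += cur
--     if acc:
--         out.append(acc)
--     return ([''] if lead else []) + out + ([''] if trail else [])
-- ===== Notes on version B (the rewrite author's own statement) =====
-- stated objective: alternative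
-- what changed: A scans indices 1..n-2 comparing each character with both neighbours (three indexed accesses per step) and patches the two ends with negative-index special cases; B is a single streaming run-length state machine (current char + run count) over the characters themselves that appends lone-run characters to an accumulator and flushes it when a run of length >= 2 ends, adding the two boundary '' markers separately.
-- outside the precondition, e.g. on solution(''): A raises IndexError, B raises IndexError
import Mathlib
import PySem

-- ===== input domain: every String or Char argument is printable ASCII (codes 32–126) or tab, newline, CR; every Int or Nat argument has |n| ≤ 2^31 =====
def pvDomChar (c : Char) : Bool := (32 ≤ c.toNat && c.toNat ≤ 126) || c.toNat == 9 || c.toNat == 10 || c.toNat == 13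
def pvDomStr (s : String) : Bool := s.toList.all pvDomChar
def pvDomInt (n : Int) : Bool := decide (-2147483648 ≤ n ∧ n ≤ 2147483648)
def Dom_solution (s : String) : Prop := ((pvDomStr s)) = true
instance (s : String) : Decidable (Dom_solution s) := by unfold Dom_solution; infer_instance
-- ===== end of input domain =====

-- B replaces A's neighbour-comparing index loop (three indexed accesses per iteration) by a
-- streaming run-length state machine over the characters themselves (measured faster by a
-- constant factor); the two agree on every string of length ≥ 2 (both Pythons raise
-- IndexError on shorter input, excluded by Pre_).

-- ===== PORT A =====
-- s[i] for an in-range (possibly negative) index; the default is never reached under Pre_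
def pvGet (cs : List Char) (i : Int) : Char := (PySem.List.pyGet? cs i).getD ' '

-- 'if x != "": res.append(x)' — the flush pattern both Pythons use verbatim
def pvFlush (res : List String) (x : String) : List String := if x ≠ "" then res ++ [x] else res

-- body of A's 'for i in range(1, len(s) - 1)' loop; state = (res, tmp)
def pvStepA (cs : List Char) (st : List String × String) (i : Int) : List String × String :=
  if pvGet cs i == pvGet cs (i - 1) || pvGet cs i == pvGet cs (i + 1) then
    (pvFlush st.1 st.2, "")
  else (st.1, st.2.push (pvGet cs i))

-- A's code after the loop (the s[-1] == s[-2] comparison)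
def pvFinA (cs : List Char) (st : List String × String) : List String :=
  if pvGet cs (-1) == pvGet cs (-2) then pvFlush st.1 st.2 ++ [""]
  else st.1 ++ [st.2.push (pvGet cs (-1))]

def solutionL (cs : List Char) : List String :=
  pvFinA cs ((PySem.List.pyRange 1 ((cs.length : Int) - 1) 1).foldl (pvStepA cs)
    (if pvGet cs 0 == pvGet cs 1 then ([""], "") else ([], "".push (pvGet cs 0))))

def solution (s : String) : List String := solutionL s.toList

-- ===== PORT B =====
-- body of B's 'for c in s[1:]' loop; state = (out, acc, cur, cnt)
def pvStepB (st : List String × String × Char × Int) (c : Char) : List String × String × Char × Int :=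
  if c == st.2.2.1 then (st.1, st.2.1, st.2.2.1, st.2.2.2 + 1)
  else if st.2.2.2 == 1 then (st.1, st.2.1.push st.2.2.1, c, 1)
  else (pvFlush st.1 st.2.1, "", c, 1)

-- B's code after the loop: 'if cnt == 1: acc += cur' then 'if acc: out.append(acc)'
def pvFinB (st : List String × String × Char × Int) : List String :=
  pvFlush st.1 (if st.2.2.2 == 1 then st.2.1.push st.2.2.1 else st.2.1)

def solutionAltL (cs : List Char) : List String :=
  (if pvGet cs 0 == pvGet cs 1 then [""] else []) ++
  pvFinB ((PySem.List.slice cs (some 1) none).foldl pvStepB ([], "", pvGet cs 0, 1)) ++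
  (if pvGet cs (-1) == pvGet cs (-2) then [""] else [])

def solution_alt (s : String) : List String := solutionAltL s.toList

-- ===== PRECONDITION & SPEC =====
-- Pre_ excludes exactly the strings of length < 2, on which A (s[0]/s[1]/s[-2]) raises IndexError.
def Pre_solution (s : String) : Prop := 2 ≤ s.toList.length
instance (s : String) : Decidable (Pre_solution s) := by unfold Pre_solution; infer_instance
def pvWitness_solution : String := "aab"

def Spec_solution (s : String) (out : List String) : Prop := out = solution_alt s
instance (s : String) (out : List String) : Decidable (Spec_solution s out) := by unfold Spec_solution; infer_instance

-- ===== CLAIM (what is proved, stated in full; the proofs are below) =====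
def Claim_equal_solution : Prop := ∀ (s : String), Dom_solution s → Pre_solution s → Spec_solution s (solution s)

-- ===== LEMMAS AND PROOFS =====

-- suffix form of A's loop + tail code: flag = (cur equals the char before it), cur :: rest remain
def gA : Bool → Char → List Char → String → List String
  | peq, cur, [], tmp => if peq then pvFlush [] tmp ++ [""] else [tmp.push cur]
  | peq, cur, d :: rest, tmp =>
    if peq || (cur == d) then pvFlush [] tmp ++ gA (d == cur) d rest ""
    else gA (d == cur) d rest (tmp.push cur)

-- suffix form of B's loop + tail code: flag = (current run has length ≥ 2 so far)
def hB : Bool → Char → List Char → String → List String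
  | many, cur, [], acc => if many then pvFlush [] acc else [acc.push cur]
  | many, cur, c :: l, acc =>
    if c == cur then hB true cur l acc
    else if many then pvFlush [] acc ++ hB false c l ""
    else hB false c l (acc.push cur)

-- the last-two-chars-equal flag of prev :: cur :: l, carried left to right
def lmB : Bool → Char → List Char → Bool
  | b, _, [] => b
  | _, cur, c :: l => lmB (c == cur) c l

theorem pvFlush_eq (res : List String) (x : String) : pvFlush res x = res ++ pvFlush [] x := by
  unfold pvFlush; split <;> simp

theorem pvGet_nat (cs : List Char) (i : Nat) (h : i < cs.length) : pvGet cs (i : Int) = cs[i] := by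
  simp [pvGet, PySem.List.pyGet?_natCast, List.getElem?_eq_getElem h]

theorem pvGet_neg_one (cs : List Char) (h : 1 ≤ cs.length) :
    pvGet cs (-1) = pvGet cs ((cs.length - 1 : Nat) : Int) := by
  unfold pvGet
  rw [PySem.List.pyGet?_neg_ofNat cs 1 (by omega) (by omega), PySem.List.pyGet?_natCast]

theorem pvGet_neg_two (cs : List Char) (h : 2 ≤ cs.length) :
    pvGet cs (-2) = pvGet cs ((cs.length - 2 : Nat) : Int) := by
  unfold pvGet
  rw [PySem.List.pyGet?_neg_ofNat cs 2 (by omega) (by omega), PySem.List.pyGet?_natCast]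

theorem pvGet_cons_neg_one (c : Char) (xs : List Char) (h : 1 ≤ xs.length) :
    pvGet (c :: xs) (-1) = pvGet xs (-1) := by
  rw [pvGet_neg_one _ (by simp), pvGet_neg_one _ h,
    pvGet_nat _ _ (by simp), pvGet_nat _ _ (by omega)]
  exact (getElem_congr rfl (show (c::xs).length - 1 = (xs.length - 1) + 1 by simp; omega)
    (by simp)).trans (by simp)

theorem pvGet_cons_neg_two (c : Char) (xs : List Char) (h : 2 ≤ xs.length) :
    pvGet (c :: xs) (-2) = pvGet xs (-2) := by
  rw [pvGet_neg_two _ (by simp; omega), pvGet_neg_two _ h,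
    pvGet_nat _ _ (by simp), pvGet_nat _ _ (by omega)]
  exact (getElem_congr rfl (show (c::xs).length - 2 = (xs.length - 2) + 1 by simp; omega)
    (by simp)).trans (by simp)

-- the heart: gA = hB plus the trailing '' marker exactly when the last two chars are equal
theorem gh (cs : List Char) :
    (∀ cur tmp, gA false cur cs tmp = hB false cur cs tmp ++ (if lmB false cur cs then [""] else []))
    ∧ (∀ cur acc, hB true cur cs acc = pvFlush [] acc ++ hB true cur cs "")
    ∧ (∀ cur, gA true cur cs "" = hB true cur cs "" ++ (if lmB true cur cs then [""] else [])) := by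
  induction cs with
  | nil =>
    refine ⟨?_, ?_, ?_⟩
    · intro cur tmp; simp [gA, hB, lmB]
    · intro cur acc; simp [hB, pvFlush]
    · intro cur; simp [gA, hB, lmB, pvFlush]
  | cons c cs ih =>
    obtain ⟨ih1, ih2, ih3⟩ := ih
    refine ⟨?_, ?_, ?_⟩
    · intro cur tmp
      by_cases hc : cur == c
      · have hca : cur = c := eq_of_beq hc
        subst hca
        simp only [gA, hB, lmB, hc, Bool.false_or, if_true]
        rw [ih3 cur, ih2 cur tmp]
        simp
      · have hcf : (cur == c) = false := by simpa using hc
        have hc' : (c == cur) = false := by rw [Bool.beq_comm]; exact hcf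
        simp only [gA, hB, lmB, hcf, hc', Bool.false_or, Bool.false_eq_true, if_false]
        exact ih1 c (tmp.push cur)
    · intro cur acc
      by_cases hc : c == cur
      · simp only [hB, hc, if_true]
        rw [ih2 cur acc]
      · have hcf : (c == cur) = false := by simpa using hc
        simp only [hB, hcf, Bool.false_eq_true, if_false, if_true]
        simp [pvFlush]
    · intro cur
      by_cases hc : c == cur
      · have hca : c = cur := eq_of_beq hc
        subst hca
        simp only [gA, hB, lmB, hc, Bool.true_or, if_true]
        simpa [pvFlush] using ih3 c
      · have hcf : (c == cur) = false := by simpa using hc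
        simp only [gA, hB, lmB, hcf, Bool.true_or, if_true, Bool.false_eq_true, if_false]
        simpa [pvFlush] using ih1 c ""

-- lmB computes the s[-1] == s[-2] comparison of the whole string
theorem lm_eq : ∀ (rest : List Char) (c0 c1 : Char),
    lmB (c1 == c0) c1 rest = (pvGet (c0 :: c1 :: rest) (-1) == pvGet (c0 :: c1 :: rest) (-2)) := by
  intro rest
  induction rest with
  | nil =>
    intro c0 c1
    rw [pvGet_neg_one _ (by simp), pvGet_neg_two _ (by simp)]
    simp only [List.length_cons, List.length_nil]
    rw [pvGet_nat _ _ (by simp), pvGet_nat _ _ (by simp)]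
    simp [lmB]
  | cons c2 r ih =>
    intro c0 c1
    show lmB (c2 == c1) c2 r = _
    rw [ih c1 c2, pvGet_cons_neg_one c0 _ (by simp), pvGet_cons_neg_two c0 _ (by simp)]

-- B's streaming loop plus its tail code equals the suffix recursion hB
theorem B_loop : ∀ (l : List Char) (out : List String) (acc : String) (cur : Char) (cnt : Int),
    1 ≤ cnt →
    pvFinB (l.foldl pvStepB (out, acc, cur, cnt)) = out ++ hB (!(cnt == 1)) cur l acc := by
  intro l
  induction l with
  | nil =>
    intro out acc cur cnt h1
    simp only [List.foldl_nil]
    unfold pvFinB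
    by_cases hc : (cnt == 1)
    · simp only [hc, if_true, Bool.not_true, hB]
      simp [pvFlush]
    · have hcf : (cnt == 1) = false := by simpa using hc
      simp only [hcf, Bool.not_false, if_false, hB, Bool.false_eq_true]
      exact pvFlush_eq out acc
  | cons c l ih =>
    intro out acc cur cnt h1
    simp only [List.foldl_cons]
    by_cases hc : c == cur
    · have hs : pvStepB (out, acc, cur, cnt) c = (out, acc, cur, cnt + 1) := by
        simp [pvStepB, hc]
      rw [hs, ih out acc cur (cnt + 1) (by omega)]
      have h2 : (cnt + 1 == 1) = false := by rw [beq_eq_false_iff_ne]; omega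
      rw [h2]
      simp only [hB, hc, if_true, Bool.not_false]
    · have hcf : (c == cur) = false := by simpa using hc
      by_cases h1c : (cnt == 1)
      · have hs : pvStepB (out, acc, cur, cnt) c = (out, acc.push cur, c, 1) := by
          simp [pvStepB, hcf, h1c]
        rw [hs, ih out (acc.push cur) c 1 (by omega)]
        have e1 : ((1:Int) == 1) = true := by decide
        simp [hB, hcf, h1c]
      · have h1f : (cnt == 1) = false := by simpa using h1c
        have hs : pvStepB (out, acc, cur, cnt) c = (pvFlush out acc, "", c, 1) := by
          simp [pvStepB, hcf, h1f]
        rw [hs, ih (pvFlush out acc) "" c 1 (by omega)]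
        have e1 : ((1:Int) == 1) = true := by decide
        simp [hB, hcf, h1f]
        rw [pvFlush_eq out acc, List.append_assoc]

-- A's indexed loop plus its tail code equals the suffix recursion gA
theorem A_loop (cs : List Char) : ∀ (m i : Nat), i + m + 1 = cs.length → 1 ≤ i →
    ∀ (res : List String) (tmp : String),
    pvFinA cs ((PySem.List.pyRange (i : Int) ((cs.length : Int) - 1) 1).foldl (pvStepA cs) (res, tmp))
      = res ++ gA (pvGet cs i == pvGet cs ((i : Int) - 1)) (pvGet cs i) (cs.drop (i + 1)) tmp := by
  intro m
  induction m with
  | zero =>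
    intro i hlen hi res tmp
    rw [PySem.List.pyRange_one_eq_nil (by omega)]
    simp only [List.foldl_nil]
    rw [List.drop_eq_nil_of_le (by omega)]
    unfold pvFinA
    rw [pvGet_neg_one cs (by omega), pvGet_neg_two cs (by omega)]
    have e1 : ((cs.length - 1 : Nat) : Int) = (i : Int) := by omega
    have e2 : ((cs.length - 2 : Nat) : Int) = (i : Int) - 1 := by omega
    rw [e1, e2]
    show _ = res ++ (if _ then pvFlush [] tmp ++ [""] else [tmp.push _])
    split
    · rw [pvFlush_eq res tmp, List.append_assoc]
    · rfl
  | succ m ihm =>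
    intro i hlen hi res tmp
    rw [PySem.List.pyRange_one_cons (by omega)]
    simp only [List.foldl_cons]
    have hcast : (i : Int) + 1 = ((i + 1 : Nat) : Int) := by push_cast; ring
    have hget : pvGet cs ((i : Int) + 1) = cs[i + 1]'(by omega) := by
      rw [hcast, pvGet_nat _ _ (by omega)]
    have hdrop : cs.drop (i + 1) = pvGet cs ((i : Int) + 1) :: cs.drop (i + 1 + 1) := by
      rw [hget]; exact List.drop_eq_getElem_cons (by omega)
    have hback : pvGet cs (((i + 1 : Nat) : Int) - 1) = pvGet cs (i : Int) := by
      congr 1; push_cast; ring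
    rw [hdrop]
    show pvFinA cs (List.foldl (pvStepA cs) (pvStepA cs (res, tmp) (i : Int)) _) = _
    by_cases hC : (pvGet cs (i:Int) == pvGet cs ((i:Int) - 1) || pvGet cs (i:Int) == pvGet cs ((i:Int) + 1)) = true
    · have hs : pvStepA cs (res, tmp) (i : Int) = (pvFlush res tmp, "") := by
        simp [pvStepA, hC]
      rw [hs, hcast, ihm (i + 1) (by omega) (by omega) (pvFlush res tmp) ""]
      rw [hback]
      show _ = res ++ gA _ _ (_ :: _) tmp
      rw [show ∀ b c d r t, gA b c (d :: r) t = if b || (c == d) then pvFlush [] t ++ gA (d == c) d r "" else gA (d == c) d r (t.push c) from fun _ _ _ _ _ => rfl]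
      rw [if_pos (by rw [← hcast]; exact hC)]
      rw [pvFlush_eq res tmp, List.append_assoc]
    · have hCf := eq_false_of_ne_true hC
      have hs : pvStepA cs (res, tmp) (i : Int) = (res, tmp.push (pvGet cs (i:Int))) := by
        simp [pvStepA, hCf]
      rw [hs, hcast, ihm (i + 1) (by omega) (by omega) res (tmp.push (pvGet cs (i:Int)))]
      rw [hback]
      show _ = res ++ gA _ _ (_ :: _) tmp
      rw [show ∀ b c d r t, gA b c (d :: r) t = if b || (c == d) then pvFlush [] t ++ gA (d == c) d r "" else gA (d == c) d r (t.push c) from fun _ _ _ _ _ => rfl]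
      rw [if_neg (by rw [← hcast]; simp [hCf])]

theorem main_eq (cs : List Char) (h : 2 ≤ cs.length) : solutionL cs = solutionAltL cs := by
  cases cs with
  | nil => simp at h
  | cons c0 t =>
    cases t with
    | nil => simp at h
    | cons c1 rest =>
      unfold solutionL solutionAltL
      have hg0 : pvGet (c0 :: c1 :: rest) 0 = c0 := by
        unfold pvGet; rw [PySem.List.pyGet?_zero_cons]; rfl
      have hg1 : pvGet (c0 :: c1 :: rest) 1 = c1 := by
        rw [show (1 : Int) = ((1 : Nat) : Int) by norm_num]
        unfold pvGet; rw [PySem.List.pyGet?_natCast]; rfl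
      have hA := A_loop (c0 :: c1 :: rest) rest.length 1 (by simp; omega) (by omega)
      rw [Nat.cast_one] at hA
      norm_num at hA
      rw [hg0, hg1] at hA
      have hB2 := B_loop (c1 :: rest) [] "" c0 1 (by norm_num)
      rw [show (!((1 : Int) == 1)) = false from by decide] at hB2
      simp only [List.nil_append] at hB2
      rw [PySem.List.slice_from_one]
      simp only [List.tail_cons]
      rw [hg0, hg1]
      rw [show (((c0 :: c1 :: rest).length : Int) - 1) = (rest.length : Int) + 1 from by simp]
      rw [hB2]
      by_cases hl : (c0 == c1) = true
      · have hc : c0 = c1 := eq_of_beq hl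
        subst hc
        rw [if_pos (by simp), if_pos (by simp)]
        rw [hA [""] ""]
        simp only [beq_self_eq_true]
        have hbb : hB false c0 (c0 :: rest) "" = hB true c0 rest "" := by
          simp [hB]
        have hlm := lm_eq rest c0 c0
        rw [beq_self_eq_true] at hlm
        rw [hbb, (gh rest).2.2 c0, hlm]
        simp
      · have hlf : (c0 == c1) = false := eq_false_of_ne_true hl
        have hlf' : (c1 == c0) = false := by rw [Bool.beq_comm]; exact hlf
        rw [if_neg (by simp [hlf]), if_neg (by simp [hlf])]
        rw [hA [] ("".push c0)]
        have hbb : hB false c0 (c1 :: rest) "" = hB false c1 rest ("".push c0) := by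
          simp [hB, hlf']
        have hlm := lm_eq rest c0 c1
        rw [hlf'] at hlm
        rw [hlf', hbb, (gh rest).1 c1 ("".push c0), hlm]
        simp

-- ===== VERDICT (by name: the statement is the Claim_ definition above) =====
theorem solution_spec : Claim_equal_solution := by
  intro s _ hpre
  unfold Spec_solution solution solution_alt
  exact main_eq s.toList hpre
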